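-- pv_equiv track=rewrite | github.com/Doctor3131/PraktikumASA | Pertemuan3/responsi/responsi.py | rekursif
-- ===== SOURCE A (Python) =====
-- def cekRekursif(data):
--     n = len(data)
--     if n <= 2:
--         return True
--     for i in range(1, n-1):
--         if not ((data[i] > data[i-1] and data[i] > data[i+1]) or
--                 (data[i] < data[i-1] and data[i] < data[i+1])):
--             return False
--
--     return True
--
-- def rekursif(n, data, hasil):
--
--     if len(data) == n:
--         if cekRekursif(data):
--             hasil.append(data.copy())
--         return hasil
--
--     for angka in range(1, n+1):
--         if angka not in data:
--             data.append(angka)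
--             rekursif(n, data, hasil)
--             data.pop()
--
--     return hasil
-- ===== SOURCE B (Python) =====
-- def _zig3(a, b, c):
--     return (b > a and b > c) or (b < a and b < c)
--
-- def _zigzag_prefix(data):
--     for a, b, c in zip(data, data[1:], data[2:]):
--         if not _zig3(a, b, c):
--             return False
--     return True
--
-- def _extend(n, cur, hasil):
--     if len(cur) == n:
--         hasil.append(list(cur))
--         return
--     for v in range(1, n + 1):
--         if v not in cur and (len(cur) < 2 or _zig3(cur[-2], cur[-1], v)):
--             cur.append(v)
--             _extend(n, cur, hasil)
--             cur.pop()
--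
-- def rekursif(n, data, hasil):
--     if not _zigzag_prefix(data):
--         return hasil
--     if len(data) >= n:
--         if len(data) == n:
--             hasil.append(list(data))
--         return hasil
--     _extend(n, list(data), hasil)
--     return hasil
-- ===== Notes on version B (the rewrite author's own statement) =====
-- stated objective: alternative
-- what changed: Instead of generating all n! permutations and testing each completed one with cekRekursif, B backtracks with an incremental zigzag check (last triple only) so invalid prefixes are pruned immediately, and it bails out up front when the given prefix already violates the zigzag property.
import Mathlib
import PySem

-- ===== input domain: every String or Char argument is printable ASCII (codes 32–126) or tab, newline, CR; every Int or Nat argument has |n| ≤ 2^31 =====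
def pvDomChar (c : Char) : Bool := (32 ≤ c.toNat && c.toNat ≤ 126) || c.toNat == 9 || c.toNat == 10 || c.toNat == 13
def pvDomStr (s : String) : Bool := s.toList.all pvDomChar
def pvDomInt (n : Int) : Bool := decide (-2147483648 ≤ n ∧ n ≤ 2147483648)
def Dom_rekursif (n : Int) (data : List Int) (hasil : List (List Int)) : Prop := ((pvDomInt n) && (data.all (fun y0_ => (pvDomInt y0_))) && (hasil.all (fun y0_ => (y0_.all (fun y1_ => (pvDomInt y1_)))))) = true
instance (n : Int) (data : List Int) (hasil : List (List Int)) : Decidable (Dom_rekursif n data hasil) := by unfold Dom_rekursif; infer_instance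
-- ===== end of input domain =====

-- B changes the algorithm: backtracking that prunes a prefix as soon as its last interior
-- element is not a local extremum, instead of generating every permutation and testing it whole.
-- Both Pythons mutate `hasil` in place (append) identically; A also temporarily mutates `data`
-- but restores it, so the equivalence proved here (return value) covers the observable behaviour.

-- Termination measure shared by both ports: how many candidates of range(1, n+1) are not yet in the list.
def pvMu (n : Int) (data : List Int) : Nat :=
  ((PySem.List.pyRange 1 (n+1) 1).filter (fun v => !(data.contains v))).length

theorem pvFilt_lt (p q : Int → Bool) (himp : ∀ x, q x = true → p x = true) (v : Int) (hp : p v = true) (hq : q v = false) :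
    ∀ (l : List Int), v ∈ l → (l.filter q).length < (l.filter p).length := by
  intro l hvl
  induction l with
  | nil => cases hvl
  | cons a tl ih =>
    by_cases hqa : q a = true
    · have hpa : p a = true := himp a hqa
      have hne : v ≠ a := fun h => by rw [h] at hq; rw [hq] at hqa; cases hqa
      have hvtl : v ∈ tl := by
        rcases List.mem_cons.mp hvl with h | h
        · exact absurd h hne
        · exact h
      simp [List.filter, hqa, hpa]
      exact ih hvtl
    · have hqa' : q a = false := by simpa using hqa
      have hle : (tl.filter q).length ≤ (tl.filter p).length :=
        List.Sublist.length_le (List.monotone_filter_right tl (by intro x hx; exact himp x hx))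
      by_cases hva : v = a
      · subst hva
        simp [List.filter, hqa', hp]
        omega
      · have hvtl : v ∈ tl := by
          rcases List.mem_cons.mp hvl with h | h
          · exact absurd h hva
          · exact h
        have := ih hvtl
        cases hpa : p a <;> simp [List.filter, hqa', hpa] <;> omega

theorem pvMu_lt (n : Int) (data : List Int) (v : Int)
    (hv : v ∈ PySem.List.pyRange 1 (n+1) 1) (hnv : data.contains v = false) :
    pvMu n (data ++ [v]) < pvMu n data := by
  unfold pvMu
  exact pvFilt_lt (fun x => !(data.contains x)) (fun x => !((data ++ [v]).contains x))
    (fun x hx => by simp only [List.contains_append, Bool.not_or, Bool.and_eq_true] at hx; exact hx.1)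
    v (by show (!(data.contains v)) = true; rw [hnv]; rfl)
    (by show (!((data ++ [v]).contains v)) = false; simp) _ hv

-- ===== PORT A =====
-- cekRekursif: range(1, n-1) ported with pyRange; data[i-1], data[i], data[i+1] are always in
-- range there, so List.getD over the (nonnegative) index is exact.
def cekRekursif (data : List Int) : Bool :=
  let n := data.length
  if n ≤ 2 then true
  else (PySem.List.pyRange 1 ((n : Int) - 1) 1).all (fun i =>
    (decide (data.getD i.toNat 0 > data.getD (i-1).toNat 0) && decide (data.getD i.toNat 0 > data.getD (i+1).toNat 0)) ||
    (decide (data.getD i.toNat 0 < data.getD (i-1).toNat 0) && decide (data.getD i.toNat 0 < data.getD (i+1).toNat 0)))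

mutual
-- the `for angka in range(1, n+1)` loop, ported as recursion over the (attached) range list
def rekLoop (n : Int) (data : List Int) (hasil : List (List Int)) (l : List {v : Int // v ∈ PySem.List.pyRange 1 (n+1) 1}) : List (List Int) :=
  match l with
  | [] => hasil
  | v :: rest =>
    if data.contains v.1 then rekLoop n data hasil rest
    else rekLoop n data (rekursif n (data ++ [v.1]) hasil) rest
termination_by (pvMu n data, 0, l.length)
decreasing_by
  · exact Prod.Lex.right _ (Prod.Lex.right _ (Nat.lt_succ_self _))
  · exact Prod.Lex.left _ _ (pvMu_lt n data v.1 v.2 (by simpa using ‹¬ data.contains v.1 = true›))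
  · exact Prod.Lex.right _ (Prod.Lex.right _ (Nat.lt_succ_self _))

def rekursif (n : Int) (data : List Int) (hasil : List (List Int)) : List (List Int) :=
  if (data.length : Int) = n then
    (if cekRekursif data then hasil ++ [data] else hasil)
  else
    rekLoop n data hasil ((PySem.List.pyRange 1 (n+1) 1).attach)
termination_by (pvMu n data, 1, 0)
decreasing_by
  · exact Prod.Lex.right _ (Prod.Lex.left _ _ (Nat.lt_succ_self 0))
end

-- ===== PORT B =====
def zig3 (a b c : Int) : Bool :=
  (decide (b > a) && decide (b > c)) || (decide (b < a) && decide (b < c))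

-- zip(data, data[1:], data[2:]) with an all-pass check
def zigzagPrefix (data : List Int) : Bool :=
  ((data.zip (data.drop 1)).zip (data.drop 2)).all (fun t => zig3 t.1.1 t.1.2 t.2)

-- `len(cur) < 2 or _zig3(cur[-2], cur[-1], v)`; cur[-2]/cur[-1] exist whenever zig3 is reached,
-- so getD over the nonnegative offsets is exact.
def stepOk (cur : List Int) (v : Int) : Bool :=
  decide (cur.length < 2) || zig3 (cur.getD (cur.length - 2) 0) (cur.getD (cur.length - 1) 0) v

mutual
def extLoop (n : Int) (cur : List Int) (hasil : List (List Int)) (l : List {v : Int // v ∈ PySem.List.pyRange 1 (n+1) 1}) : List (List Int) :=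
  match l with
  | [] => hasil
  | v :: rest =>
    if !(cur.contains v.1) && stepOk cur v.1 then
      extLoop n cur (extendZ n (cur ++ [v.1]) hasil) rest
    else extLoop n cur hasil rest
termination_by (pvMu n cur, 0, l.length)
decreasing_by
  · exact Prod.Lex.left _ _ (pvMu_lt n cur v.1 v.2 (by
      rename_i h
      simp only [Bool.and_eq_true, Bool.not_eq_true'] at h
      exact h.1))
  · exact Prod.Lex.right _ (Prod.Lex.right _ (Nat.lt_succ_self _))
  · exact Prod.Lex.right _ (Prod.Lex.right _ (Nat.lt_succ_self _))

def extendZ (n : Int) (cur : List Int) (hasil : List (List Int)) : List (List Int) :=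
  if (cur.length : Int) = n then hasil ++ [cur]
  else extLoop n cur hasil ((PySem.List.pyRange 1 (n+1) 1).attach)
termination_by (pvMu n cur, 1, 0)
decreasing_by
  · exact Prod.Lex.right _ (Prod.Lex.left _ _ (Nat.lt_succ_self 0))
end

def rekursif_alt (n : Int) (data : List Int) (hasil : List (List Int)) : List (List Int) :=
  if !(zigzagPrefix data) then hasil
  else if n ≤ (data.length : Int) then
    (if (data.length : Int) = n then hasil ++ [data] else hasil)
  else extendZ n data hasil

-- ===== PRECONDITION & SPEC =====
def Spec_rekursif (n : Int) (data : List Int) (hasil : List (List Int)) (out : List (List Int)) : Prop := out = rekursif_alt n data hasil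
instance (n : Int) (data : List Int) (hasil : List (List Int)) (out : List (List Int)) : Decidable (Spec_rekursif n data hasil out) := by unfold Spec_rekursif; infer_instance

-- ===== CLAIM (what is proved, stated in full; the proofs are below) =====
def Claim_equal_rekursif : Prop := ∀ (n : Int) (data : List Int) (hasil : List (List Int)), Dom_rekursif n data hasil → Spec_rekursif n data hasil (rekursif n data hasil)

-- ===== LEMMAS AND PROOFS =====

theorem pOk_cons3 (a b c : Int) (t : List Int) :
    zigzagPrefix (a :: b :: c :: t) = (zig3 a b c && zigzagPrefix (b :: c :: t)) := by
  simp [zigzagPrefix]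

theorem pOk_short (data : List Int) (h : data.length ≤ 2) : zigzagPrefix data = true := by
  match data, h with
  | [], _ => rfl
  | [a], _ => rfl
  | [a, b], _ => rfl

theorem stepOk_cons (a : Int) (l : List Int) (v : Int) (h : 2 ≤ l.length) :
    stepOk (a :: l) v = stepOk l v := by
  obtain ⟨m, hm⟩ : ∃ m, l.length = m + 2 := ⟨l.length - 2, by omega⟩
  simp [stepOk, hm, List.getD]

theorem pOk_snoc (v : Int) : ∀ (l : List Int), zigzagPrefix (l ++ [v]) = (zigzagPrefix l && stepOk l v) := by
  intro l
  induction l with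
  | nil => simp [zigzagPrefix, stepOk]
  | cons a tl ih =>
    match tl, ih with
    | [], _ => simp [zigzagPrefix, stepOk, zig3]
    | [b], _ =>
      show zigzagPrefix [a, b, v] = _
      simp [zigzagPrefix, stepOk, List.getD]
    | b :: c :: t, ih =>
      have h1 : zigzagPrefix ((a :: b :: c :: t) ++ [v]) = (zig3 a b c && zigzagPrefix ((b :: c :: t) ++ [v])) := by
        simpa using pOk_cons3 a b c (t ++ [v])
      rw [h1, ih, pOk_cons3, stepOk_cons a (b :: c :: t) v (by simp), Bool.and_assoc]

theorem ck_aux : ∀ (data : List Int), (List.range (data.length - 2)).all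
    (fun k => zig3 (data.getD k 0) (data.getD (k+1) 0) (data.getD (k+2) 0)) = zigzagPrefix data := by
  intro data
  induction data with
  | nil => rfl
  | cons a tl ih =>
    match tl, ih with
    | [], _ => rfl
    | [b], _ => rfl
    | b :: c :: t, ih =>
      have hlen : (a :: b :: c :: t).length - 2 = t.length + 1 := by simp
      rw [hlen, List.range_succ_eq_map, List.all_cons, List.all_map, pOk_cons3]
      have htl : (b :: c :: t).length - 2 = t.length := by simp
      rw [htl] at ih
      rw [← ih]
      congr 1

theorem ck_eq (data : List Int) : cekRekursif data = zigzagPrefix data := by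
  unfold cekRekursif
  by_cases h2 : data.length ≤ 2
  · simp only [h2, if_pos]
    exact (pOk_short data h2).symm
  · rw [if_neg h2, PySem.List.pyRange_one]
    have hlen : (((data.length : Int) - 1) - 1).toNat = data.length - 2 := by omega
    rw [hlen, List.all_map, ← ck_aux data]
    congr 1
    funext k
    have e1 : ((1 : Int) + (k : Int)).toNat = k + 1 := by omega
    have e2 : ((1 : Int) + (k : Int) - 1).toNat = k := by omega
    have e3 : ((1 : Int) + (k : Int) + 1).toNat = k + 2 := by omega
    simp only [Function.comp_apply, e1, e2, e3, zig3]

theorem A_pOk_false (n : Int) : ∀ (k : Nat) (data : List Int), pvMu n data = k →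
    zigzagPrefix data = false → ∀ h, rekursif n data h = h := by
  intro k
  induction k using Nat.strong_induction_on with
  | _ k IH =>
    intro data hk hpok h
    rw [rekursif]
    by_cases hlen : (data.length : Int) = n
    · rw [if_pos hlen, ck_eq, hpok]; simp
    · rw [if_neg hlen]
      have loop : ∀ (L : List {v : Int // v ∈ PySem.List.pyRange 1 (n+1) 1}) (h : List (List Int)),
          rekLoop n data h L = h := by
        intro L
        induction L with
        | nil => intro h; rw [rekLoop]
        | cons v rest ihL =>
          intro h
          rw [rekLoop]
          by_cases hc : data.contains v.1 = true
          · rw [if_pos hc]; exact ihL h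
          · rw [if_neg hc]
            have hmu : pvMu n (data ++ [v.1]) < k :=
              hk ▸ pvMu_lt n data v.1 v.2 (by simpa using hc)
            rw [IH _ hmu _ rfl (by rw [pOk_snoc, hpok]; rfl) h]
            exact ihL h
      exact loop _ h

theorem A_long (n : Int) : ∀ (k : Nat) (data : List Int), pvMu n data = k →
    n < (data.length : Int) → ∀ h, rekursif n data h = h := by
  intro k
  induction k using Nat.strong_induction_on with
  | _ k IH =>
    intro data hk hlong h
    rw [rekursif, if_neg (by omega)]
    have loop : ∀ (L : List {v : Int // v ∈ PySem.List.pyRange 1 (n+1) 1}) (h : List (List Int)),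
        rekLoop n data h L = h := by
      intro L
      induction L with
      | nil => intro h; rw [rekLoop]
      | cons v rest ihL =>
        intro h
        rw [rekLoop]
        by_cases hc : data.contains v.1 = true
        · rw [if_pos hc]; exact ihL h
        · rw [if_neg hc]
          have hmu : pvMu n (data ++ [v.1]) < k :=
            hk ▸ pvMu_lt n data v.1 v.2 (by simpa using hc)
          rw [IH _ hmu _ rfl (by simp only [List.length_append, List.length_singleton]; push_cast; omega) h]
          exact ihL h
    exact loop _ h

theorem A_eq_ext (n : Int) : ∀ (k : Nat) (data : List Int), pvMu n data = k →
    zigzagPrefix data = true → (data.length : Int) ≤ n → ∀ h, rekursif n data h = extendZ n data h := by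
  intro k
  induction k using Nat.strong_induction_on with
  | _ k IH =>
    intro data hk hpok hle h
    by_cases hlen : (data.length : Int) = n
    · rw [rekursif, extendZ, if_pos hlen, if_pos hlen, ck_eq, hpok, if_pos rfl]
    · rw [rekursif, extendZ, if_neg hlen, if_neg hlen]
      have hlt : (data.length : Int) < n := lt_of_le_of_ne hle hlen
      have loop : ∀ (L : List {v : Int // v ∈ PySem.List.pyRange 1 (n+1) 1}) (h : List (List Int)),
          rekLoop n data h L = extLoop n data h L := by
        intro L
        induction L with
        | nil => intro h; rw [rekLoop, extLoop]
        | cons v rest ihL =>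
          intro h
          rw [rekLoop, extLoop]
          by_cases hc : data.contains v.1 = true
          · rw [if_pos hc, show (!data.contains v.1 && stepOk data v.1) = false by rw [hc]; rfl]
            simp only [Bool.false_eq_true, if_false]
            exact ihL h
          · have hc' : data.contains v.1 = false := by simpa using hc
            have hmu : pvMu n (data ++ [v.1]) < k :=
              hk ▸ pvMu_lt n data v.1 v.2 hc'
            rw [if_neg hc]
            by_cases hs : stepOk data v.1 = true
            · rw [if_pos (by rw [hc', hs]; rfl)]
              rw [IH _ hmu _ rfl (by rw [pOk_snoc, hpok, hs]; rfl)
                (by simp only [List.length_append, List.length_singleton]; push_cast; omega) h]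
              exact ihL (extendZ n (data ++ [v.1]) h)
            · have hs' : stepOk data v.1 = false := by simpa using hs
              rw [show (!data.contains v.1 && stepOk data v.1) = false by rw [hc', hs']; rfl]
              simp only [Bool.false_eq_true, if_false]
              rw [A_pOk_false n (pvMu n (data ++ [v.1])) _ rfl (by rw [pOk_snoc, hpok, hs']; rfl) h]
              exact ihL h
      exact loop _ h

-- ===== VERDICT (by name: the statement is the Claim_ definition above) =====
theorem rekursif_spec : Claim_equal_rekursif := by
  intro n data hasil _dom
  unfold Spec_rekursif rekursif_alt
  split_ifs with h1 h2 h3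
  · have hp : zigzagPrefix data = false := by simpa using h1
    exact A_pOk_false n (pvMu n data) data rfl hp hasil
  · have hp : zigzagPrefix data = true := by simpa using h1
    rw [rekursif]
    simp [h3, ck_eq, hp]
  · have hp : zigzagPrefix data = true := by simpa using h1
    exact A_long n (pvMu n data) data rfl (by omega) hasil
  · have hp : zigzagPrefix data = true := by simpa using h1
    exact A_eq_ext n (pvMu n data) data rfl hp (by omega) hasil
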